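-- pv_equiv track=rewrite | github.com/kenkyuuka/tamago | scripts/survey_installed_games.py | _collect_update_dirs
-- ===== SOURCE A (Python) =====
-- def _collect_update_dirs(tpm_groups, tpm_index, missing, no_tpm_encrypted=None):
--     """Collect unique game directories that need updating.
--
--     Returns a list of game_dir paths — games with unknown TPM hashes,
--     games with known TPMs but missing XP3 hashes, and no-TPM games
--     with genuinely encrypted files.
--     """
--     dirs = set()
--
--     # Unknown TPM hash groups
--     for tpm_hash, entries in tpm_groups.items():
--         if tpm_hash not in tpm_index:
--             for _pub, _game, _tpm, game_dir in entries:
--                 dirs.add(game_dir)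
--
--     # Known games with missing XP3 hashes
--     for game_key, hash_entries in missing.items():
--         for _h, _basename, label in hash_entries:
--             # Recover game_dir from tpm_groups
--             for tpm_hash, tpm_entries in tpm_groups.items():
--                 if tpm_index.get(tpm_hash) == game_key:
--                     for _pub, _game, _tpm, game_dir in tpm_entries:
--                         dirs.add(game_dir)
--
--     # No-TPM games with genuinely encrypted files
--     if no_tpm_encrypted:
--         for _pub, _game, _xp3_name, _result, gdir in no_tpm_encrypted:
--             dirs.add(gdir)
--
--     return sorted(dirs)
-- ===== SOURCE B (Python) =====
-- def _collect_update_dirs(tpm_groups, tpm_index, missing, no_tpm_encrypted=None):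
--     """Collect unique game directories that need updating.
--
--     Builds a flat candidate list with comprehensions — one filtered pass
--     over tpm_groups guarded by a precomputed set of game_keys with missing
--     hash entries — and dedups once at the end with sorted(set(...)).
--     """
--     # game_keys that have at least one missing hash entry
--     active = {game_key
--               for game_key, hash_entries in missing.items()
--               for _h, _basename, label in hash_entries}
--
--     # one filtered pass: unknown TPM hash, or known TPM whose game has missing hashes
--     cand = [game_dir
--             for tpm_hash, entries in tpm_groups.items()
--             if tpm_hash not in tpm_index or tpm_index[tpm_hash] in active
--             for _pub, _game, _tpm, game_dir in entries]
--
--     if no_tpm_encrypted: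
--         cand += [gdir for _pub, _game, _xp3_name, _result, gdir in no_tpm_encrypted]
--
--     return sorted(set(cand))
-- ===== Notes on version B (the rewrite author's own statement) =====
-- stated objective: faster
-- what changed: Precomputes the set of game_keys with missing hash entries and builds one flat filtered candidate list over tpm_groups (dedup once via sorted(set(...))), replacing A's per-missing-entry rescan of tpm_groups and incremental set insertion.
import Mathlib
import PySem

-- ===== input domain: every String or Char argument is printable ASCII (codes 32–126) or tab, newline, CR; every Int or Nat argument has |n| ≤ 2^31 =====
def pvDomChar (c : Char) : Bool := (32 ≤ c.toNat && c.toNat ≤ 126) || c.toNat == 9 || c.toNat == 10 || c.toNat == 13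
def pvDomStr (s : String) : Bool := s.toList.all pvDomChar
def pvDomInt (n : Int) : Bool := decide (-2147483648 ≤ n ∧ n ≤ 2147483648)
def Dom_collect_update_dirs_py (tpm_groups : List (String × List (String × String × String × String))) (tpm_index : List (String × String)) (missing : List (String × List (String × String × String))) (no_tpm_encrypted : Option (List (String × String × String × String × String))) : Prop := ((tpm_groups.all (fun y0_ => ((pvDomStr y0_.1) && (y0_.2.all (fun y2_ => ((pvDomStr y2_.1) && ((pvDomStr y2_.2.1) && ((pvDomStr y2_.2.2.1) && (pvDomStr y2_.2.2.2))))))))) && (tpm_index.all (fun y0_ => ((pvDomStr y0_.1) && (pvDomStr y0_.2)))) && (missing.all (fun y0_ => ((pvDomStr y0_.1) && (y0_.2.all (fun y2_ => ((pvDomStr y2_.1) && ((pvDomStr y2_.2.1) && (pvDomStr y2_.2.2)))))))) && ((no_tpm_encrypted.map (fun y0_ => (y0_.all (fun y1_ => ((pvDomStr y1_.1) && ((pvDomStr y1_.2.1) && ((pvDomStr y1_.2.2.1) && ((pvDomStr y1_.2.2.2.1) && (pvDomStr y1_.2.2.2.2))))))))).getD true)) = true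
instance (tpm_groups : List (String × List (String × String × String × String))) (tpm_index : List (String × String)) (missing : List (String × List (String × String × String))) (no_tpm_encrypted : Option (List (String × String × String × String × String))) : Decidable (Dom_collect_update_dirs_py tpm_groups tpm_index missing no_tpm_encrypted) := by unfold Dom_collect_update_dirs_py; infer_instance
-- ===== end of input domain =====

-- B precomputes the set of active game_keys and builds one flat filtered candidate list,
-- dedup once via sorted(set(...)), replacing A's per-missing-entry rescan of tpm_groups (faster).


-- ===== PORT A =====
-- Literal transliteration of A; `if no_tpm_encrypted:` skips None and [], and folding the
-- empty list is the identity, so the `some` branch handles [] exactly.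
def collect_update_dirs_py (tpm_groups : List (String × List (String × String × String × String))) (tpm_index : List (String × String)) (missing : List (String × List (String × String × String))) (no_tpm_encrypted : Option (List (String × String × String × String × String))) : List String :=
  let dirs : PySem.Set String := PySem.Set.empty
  -- Unknown TPM hash groups
  let dirs := tpm_groups.foldl (fun dirs g =>
    if PySem.Dict.contains (⟨tpm_index⟩ : PySem.Dict String String) g.1 = false then
      g.2.foldl (fun dirs e => PySem.Set.add dirs e.2.2.2) dirs
    else dirs) dirs
  -- Known games with missing XP3 hashes
  let dirs := missing.foldl (fun dirs m =>
    m.2.foldl (fun dirs _he =>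
      tpm_groups.foldl (fun dirs g =>
        if PySem.Dict.get? (⟨tpm_index⟩ : PySem.Dict String String) g.1 = some m.1 then
          g.2.foldl (fun dirs e => PySem.Set.add dirs e.2.2.2) dirs
        else dirs) dirs) dirs) dirs
  -- No-TPM games with genuinely encrypted files
  let dirs := match no_tpm_encrypted with
    | none => dirs
    | some l => l.foldl (fun dirs e => PySem.Set.add dirs e.2.2.2.2) dirs
  PySem.List.sorted dirs (fun x => x) false

-- ===== PORT B =====
-- From Source B: set/list comprehensions → Set.ofList of flatMap/map over a filtered pass;
-- `tpm_hash not in tpm_index or tpm_index[tpm_hash] in active` is the match on Dict.get?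
-- (the subscript is only reached when the key is present, = the some branch).
def collect_update_dirs_py_alt (tpm_groups : List (String × List (String × String × String × String))) (tpm_index : List (String × String)) (missing : List (String × List (String × String × String))) (no_tpm_encrypted : Option (List (String × String × String × String × String))) : List String :=
  let active : PySem.Set String :=
    PySem.Set.ofList (missing.flatMap (fun m => m.2.map (fun _he => m.1)))
  let cand : List String :=
    (tpm_groups.filter (fun g =>
        match PySem.Dict.get? (⟨tpm_index⟩ : PySem.Dict String String) g.1 with
        | none => true
        | some k => PySem.Set.contains active k)).flatMap
      (fun g => g.2.map (fun e => e.2.2.2))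
  let cand := match no_tpm_encrypted with
    | none => cand
    | some l => cand ++ l.map (fun e => e.2.2.2.2)
  PySem.List.sorted (PySem.Set.ofList cand) (fun x => x) false

-- ===== PRECONDITION & SPEC =====
def Spec_collect_update_dirs_py (tpm_groups : List (String × List (String × String × String × String))) (tpm_index : List (String × String)) (missing : List (String × List (String × String × String))) (no_tpm_encrypted : Option (List (String × String × String × String × String))) (out : List String) : Prop := out = collect_update_dirs_py_alt tpm_groups tpm_index missing no_tpm_encrypted
instance (tpm_groups : List (String × List (String × String × String × String))) (tpm_index : List (String × String)) (missing : List (String × List (String × String × String))) (no_tpm_encrypted : Option (List (String × String × String × String × String))) (out : List String) : Decidable (Spec_collect_update_dirs_py tpm_groups tpm_index missing no_tpm_encrypted out) := by unfold Spec_collect_update_dirs_py; infer_instance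

-- ===== CLAIM (what is proved, stated in full; the proofs are below) =====
def Claim_equal_collect_update_dirs_py : Prop := ∀ (tpm_groups : List (String × List (String × String × String × String))) (tpm_index : List (String × String)) (missing : List (String × List (String × String × String))) (no_tpm_encrypted : Option (List (String × String × String × String × String))), Dom_collect_update_dirs_py tpm_groups tpm_index missing no_tpm_encrypted → Spec_collect_update_dirs_py tpm_groups tpm_index missing no_tpm_encrypted (collect_update_dirs_py tpm_groups tpm_index missing no_tpm_encrypted)

-- ===== LEMMAS AND PROOFS =====

-- generic foldl membership: if each step's membership is 'old ∨ Q b x', so is the fold's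
theorem pv_mem_foldl_step {α β : Type} (l : List β) (step : List α → β → List α)
    (Q : β → α → Prop) (h : ∀ s b x, x ∈ step s b ↔ x ∈ s ∨ Q b x) (s : List α) (x : α) :
    x ∈ l.foldl step s ↔ x ∈ s ∨ ∃ b ∈ l, Q b x := by
  induction l generalizing s with
  | nil => simp
  | cons b t ih =>
    simp only [List.foldl_cons, ih, h, List.mem_cons]
    constructor
    · rintro ((hs | hq) | ⟨c, hc, hQ⟩)
      · exact Or.inl hs
      · exact Or.inr ⟨b, Or.inl rfl, hq⟩
      · exact Or.inr ⟨c, Or.inr hc, hQ⟩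
    · rintro (hs | ⟨c, (rfl | hc), hQ⟩)
      · exact Or.inl (Or.inl hs)
      · exact Or.inl (Or.inr hQ)
      · exact Or.inr ⟨c, hc, hQ⟩

-- generic foldl nodup preservation
theorem pv_nodup_foldl_step {α β : Type} (l : List β) (step : List α → β → List α)
    (h : ∀ s b, s.Nodup → (step s b).Nodup) (s : List α) (hs : s.Nodup) :
    (l.foldl step s).Nodup := by
  induction l generalizing s with
  | nil => exact hs
  | cons b t ih => exact ih _ (h _ _ hs)

theorem pv_mem_foldl_add_proj {α β : Type} [BEq α] [LawfulBEq α] (l : List β) (f : β → α)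
    (s : List α) (x : α) :
    x ∈ l.foldl (fun s e => PySem.Set.add s (f e)) s ↔ x ∈ s ∨ ∃ e ∈ l, x = f e :=
  pv_mem_foldl_step l _ (fun e x => x = f e) (fun s b x => PySem.Set.mem_add s (f b) x) s x

theorem pv_nodup_foldl_add_proj {α β : Type} [BEq α] [LawfulBEq α] (l : List β) (f : β → α)
    (s : List α) (hs : s.Nodup) :
    (l.foldl (fun s e => PySem.Set.add s (f e)) s).Nodup :=
  pv_nodup_foldl_step l _ (fun s b h => PySem.Set.nodup_add s (f b) h) s hs

-- guarded add-fold over the entries of b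
theorem pv_mem_foldl_guard_add {α β γ : Type} [BEq α] [LawfulBEq α] (l : List β)
    (c : β → Prop) [DecidablePred c] (g : β → List γ) (f : γ → α) (s : List α) (x : α) :
    x ∈ l.foldl (fun s b => if c b then (g b).foldl (fun s e => PySem.Set.add s (f e)) s else s) s ↔
      x ∈ s ∨ ∃ b ∈ l, c b ∧ ∃ e ∈ g b, x = f e := by
  refine pv_mem_foldl_step l _ (fun b x => c b ∧ ∃ e ∈ g b, x = f e) ?_ s x
  intro s b x
  by_cases hc : c b
  · simp [hc, pv_mem_foldl_add_proj]
  · simp [hc]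

theorem pv_nodup_foldl_guard_add {α β γ : Type} [BEq α] [LawfulBEq α] (l : List β)
    (c : β → Prop) [DecidablePred c] (g : β → List γ) (f : γ → α) (s : List α) (hs : s.Nodup) :
    (l.foldl (fun s b => if c b then (g b).foldl (fun s e => PySem.Set.add s (f e)) s else s) s).Nodup := by
  refine pv_nodup_foldl_step l _ ?_ s hs
  intro s b h
  by_cases hc : c b
  · simpa [hc] using pv_nodup_foldl_add_proj (g b) f s h
  · simpa [hc] using h

-- names for the intermediate sets of the two ports (proof-only helpers)
def pvSetA (G : List (String × List (String × String × String × String))) (TI : List (String × String)) (M : List (String × List (String × String × String))) : List String :=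
  M.foldl (fun dirs m =>
    m.2.foldl (fun dirs _he =>
      G.foldl (fun dirs g =>
        if PySem.Dict.get? (PySem.Dict.mk TI) g.1 = some m.1 then
          g.2.foldl (fun dirs e => PySem.Set.add dirs e.2.2.2) dirs
        else dirs) dirs) dirs)
    (G.foldl (fun dirs g =>
      if PySem.Dict.contains (PySem.Dict.mk TI) g.1 = false then
        g.2.foldl (fun dirs e => PySem.Set.add dirs e.2.2.2) dirs
      else dirs) PySem.Set.empty)

def pvActive (M : List (String × List (String × String × String))) : List String :=
  PySem.Set.ofList (M.flatMap (fun m => m.2.map (fun _he => m.1)))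

def pvCand (G : List (String × List (String × String × String × String))) (TI : List (String × String)) (M : List (String × List (String × String × String))) : List String :=
  (G.filter (fun g =>
      match PySem.Dict.get? (PySem.Dict.mk TI) g.1 with
      | none => true
      | some k => PySem.Set.contains (pvActive M) k)).flatMap
    (fun g => g.2.map (fun e => e.2.2.2))

-- the common membership condition
def pvP (G : List (String × List (String × String × String × String))) (TI : List (String × String)) (M : List (String × List (String × String × String))) (x : String) : Prop :=
  ∃ g ∈ G, (PySem.Dict.get? (PySem.Dict.mk TI) g.1 = none ∨
      ∃ m ∈ M, (∃ he, he ∈ m.2) ∧ PySem.Dict.get? (PySem.Dict.mk TI) g.1 = some m.1) ∧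
    ∃ e ∈ g.2, x = e.2.2.2

theorem pv_mem_active (M : List (String × List (String × String × String))) (k : String) :
    k ∈ pvActive M ↔ ∃ m ∈ M, (∃ he, he ∈ m.2) ∧ k = m.1 := by
  unfold pvActive
  simp only [PySem.Set.mem_ofList, List.mem_flatMap, List.mem_map]
  constructor
  · rintro ⟨m, hm, he, hhe, rfl⟩
    exact ⟨m, hm, ⟨he, hhe⟩, rfl⟩
  · rintro ⟨m, hm, ⟨he, hhe⟩, rfl⟩
    exact ⟨m, hm, he, hhe, rfl⟩

theorem pv_contains_false_iff (TI : List (String × String)) (h : String) :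
    PySem.Dict.contains (PySem.Dict.mk TI) h = false ↔
      PySem.Dict.get? (PySem.Dict.mk TI) h = none := by
  rw [PySem.Dict.contains_eq_isSome_get?]
  cases PySem.Dict.get? (PySem.Dict.mk TI) h <;> simp

theorem pv_mem_setA (G : List (String × List (String × String × String × String))) (TI : List (String × String)) (M : List (String × List (String × String × String))) (x : String) :
    x ∈ pvSetA G TI M ↔ pvP G TI M x := by
  unfold pvSetA pvP
  rw [pv_mem_foldl_step _ _
      (fun m x => (∃ he, he ∈ m.2) ∧ ∃ g ∈ G,
        PySem.Dict.get? (PySem.Dict.mk TI) g.1 = some m.1 ∧ ∃ e ∈ g.2, x = e.2.2.2) ?_]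
  · rw [pv_mem_foldl_guard_add G _ (fun g => g.2) (fun e => e.2.2.2) PySem.Set.empty x]
    simp only [PySem.Set.empty, List.not_mem_nil, false_or]
    constructor
    · rintro (⟨g, hg, hc, hd⟩ | ⟨m, hm, hhe, g, hg, hk, hd⟩)
      · exact ⟨g, hg, Or.inl ((pv_contains_false_iff TI g.1).mp hc), hd⟩
      · exact ⟨g, hg, Or.inr ⟨m, hm, hhe, hk⟩, hd⟩
    · rintro ⟨g, hg, (hn | ⟨m, hm, hhe, hk⟩), hd⟩
      · exact Or.inl ⟨g, hg, (pv_contains_false_iff TI g.1).mpr hn, hd⟩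
      · exact Or.inr ⟨m, hm, hhe, g, hg, hk, hd⟩
  · intro s m x
    rw [pv_mem_foldl_step _ _
        (fun _he x => ∃ g ∈ G,
          PySem.Dict.get? (PySem.Dict.mk TI) g.1 = some m.1 ∧ ∃ e ∈ g.2, x = e.2.2.2) ?_]
    · constructor
      · rintro (hs | ⟨he, hhe, hq⟩)
        · exact Or.inl hs
        · exact Or.inr ⟨⟨he, hhe⟩, hq⟩
      · rintro (hs | ⟨⟨he, hhe⟩, hq⟩)
        · exact Or.inl hs
        · exact Or.inr ⟨he, hhe, hq⟩
    · intro s _he x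
      exact pv_mem_foldl_guard_add G _ (fun g => g.2) (fun e => e.2.2.2) s x

theorem pv_mem_cand (G : List (String × List (String × String × String × String))) (TI : List (String × String)) (M : List (String × List (String × String × String))) (x : String) :
    x ∈ pvCand G TI M ↔ pvP G TI M x := by
  unfold pvCand pvP
  simp only [List.mem_flatMap, List.mem_filter, List.mem_map]
  constructor
  · rintro ⟨g, ⟨hg, hc⟩, e, he, rfl⟩
    refine ⟨g, hg, ?_, e, he, rfl⟩
    rcases hk : PySem.Dict.get? (PySem.Dict.mk TI) g.1 with _ | k
    · exact Or.inl rfl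
    · rw [hk] at hc
      have : k ∈ pvActive M := PySem.Set.contains_iff _ _ |>.mp hc
      rcases (pv_mem_active M k).mp this with ⟨m, hm, hhe, rfl⟩
      exact Or.inr ⟨m, hm, hhe, rfl⟩
  · rintro ⟨g, hg, (hn | ⟨m, hm, hhe, hk⟩), e, he, rfl⟩
    · exact ⟨g, ⟨hg, by rw [hn]⟩, e, he, rfl⟩
    · refine ⟨g, ⟨hg, ?_⟩, e, he, rfl⟩
      rw [hk]
      exact PySem.Set.contains_iff _ _ |>.mpr ((pv_mem_active M m.1).mpr ⟨m, hm, hhe, rfl⟩)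

theorem pv_nodup_setA (G : List (String × List (String × String × String × String))) (TI : List (String × String)) (M : List (String × List (String × String × String))) :
    (pvSetA G TI M).Nodup := by
  unfold pvSetA
  refine pv_nodup_foldl_step _ _ ?_ _
    (pv_nodup_foldl_guard_add G _ (fun g => g.2) (fun e => e.2.2.2) PySem.Set.empty List.nodup_nil)
  intro s m h
  refine pv_nodup_foldl_step _ _ ?_ _ h
  intro s _he h
  exact pv_nodup_foldl_guard_add G _ (fun g => g.2) (fun e => e.2.2.2) s h

-- final multiset equality, both shapes of no_tpm_encrypted
theorem pv_perm_none (G : List (String × List (String × String × String × String))) (TI : List (String × String)) (M : List (String × List (String × String × String))) :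
    (pvSetA G TI M).Perm (PySem.Set.ofList (pvCand G TI M)) :=
  (List.perm_ext_iff_of_nodup (pv_nodup_setA G TI M) (PySem.Set.nodup_ofList _)).mpr
    (fun x => by
      rw [PySem.Set.mem_ofList, pv_mem_setA G TI M x, pv_mem_cand G TI M x])

theorem pv_perm_some (G : List (String × List (String × String × String × String))) (TI : List (String × String)) (M : List (String × List (String × String × String))) (l : List (String × String × String × String × String)) :
    (l.foldl (fun dirs e => PySem.Set.add dirs e.2.2.2.2) (pvSetA G TI M)).Perm
      (PySem.Set.ofList (pvCand G TI M ++ l.map (fun e => e.2.2.2.2))) := by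
  refine (List.perm_ext_iff_of_nodup
    (pv_nodup_foldl_add_proj l (fun e => e.2.2.2.2) _ (pv_nodup_setA G TI M))
    (PySem.Set.nodup_ofList _)).mpr ?_
  intro x
  rw [pv_mem_foldl_add_proj l (fun e => e.2.2.2.2) _ x, PySem.Set.mem_ofList,
      List.mem_append, pv_mem_setA G TI M x, pv_mem_cand G TI M x]
  simp [List.mem_map, eq_comm]

-- ===== VERDICT =====
theorem collect_update_dirs_py_spec : Claim_equal_collect_update_dirs_py := by
  intro G TI M N _
  show collect_update_dirs_py G TI M N = collect_update_dirs_py_alt G TI M N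
  simp only [collect_update_dirs_py, collect_update_dirs_py_alt]
  refine PySem.List.sorted_eq_sorted_of_perm _ _ _ (fun a b h => h) ?_
  cases N with
  | none => exact pv_perm_none G TI M
  | some l => exact pv_perm_some G TI M l
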